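-- pv_equiv track=rewrite | github.com/koviddutta/paste-studio-mvp | app/database/gelato_university_client.py | get_formulation_type_from_ingredients
-- ===== SOURCE A (Python) =====
-- def get_formulation_type_from_ingredients(classified_ingredients: list[dict]) -> str:
--     """Determines formulation type based on classified ingredients.
--
--     Args:
--         classified_ingredients: List of ingredients with their full data.
--
--     Returns:
--         Formulation type string for threshold lookup.
--     """
--     has_chocolate = any(
--         (
--             "chocolate" in ing.get("name", "").lower()
--             or "cocoa" in ing.get("name", "").lower()
--             for ing in classified_ingredients
--         )
--     )
--     has_nuts = any((ing.get("class_name") == "B_NUT" for ing in classified_ingredients))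
--     has_eggs = any(
--         ("egg" in ing.get("name", "").lower() for ing in classified_ingredients)
--     )
--     has_dairy = any(
--         (ing.get("class_name") == "A_DAIRY" for ing in classified_ingredients)
--     )
--     has_fruit = any(
--         (
--             "fruit" in ing.get("name", "").lower()
--             or any(
--                 (
--                     fruit in ing.get("name", "").lower()
--                     for fruit in ["mango", "strawberry", "orange", "lemon", "apple"]
--                 )
--             )
--             for ing in classified_ingredients
--         )
--     )
--     if has_chocolate:
--         return "cocoa_chocolate"
--     elif has_nuts or has_eggs:
--         return "eggs_nuts"
--     elif has_fruit and has_dairy: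
--         return "dairy_fruit"
--     elif has_dairy and (not has_fruit):
--         return "pure_dairy"
--     elif has_fruit and (not has_dairy):
--         return "fruit_sorbet"
--     else:
--         return "dairy_fruit"
-- ===== SOURCE B (Python) =====
-- _FRUIT_WORDS = ("fruit", "mango", "strawberry", "orange", "lemon", "apple")
--
-- _C = "cocoa_chocolate"
-- _E = "eggs_nuts"
-- # Precomputed result for every 5-bit feature mask:
-- # bit 0 = chocolate/cocoa, bit 1 = nuts, bit 2 = eggs, bit 3 = dairy, bit 4 = fruit.
-- _TABLE = [
--     "dairy_fruit", _C, _E, _C, _E, _C, _E, _C,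
--     "pure_dairy", _C, _E, _C, _E, _C, _E, _C,
--     "fruit_sorbet", _C, _E, _C, _E, _C, _E, _C,
--     "dairy_fruit", _C, _E, _C, _E, _C, _E, _C,
-- ]
--
--
-- def _ingredient_mask(ing):
--     """5-bit feature mask of a single ingredient."""
--     name = ing.get("name", "").lower()
--     cls = ing.get("class_name")
--     mask = 0
--     if "chocolate" in name or "cocoa" in name:
--         mask |= 1
--     if cls == "B_NUT":
--         mask |= 2
--     if "egg" in name:
--         mask |= 4
--     if cls == "A_DAIRY":
--         mask |= 8
--     if any(w in name for w in _FRUIT_WORDS):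
--         mask |= 16
--     return mask
--
--
-- def get_formulation_type_from_ingredients(classified_ingredients: list[dict]) -> str:
--     """OR together the per-ingredient feature masks, then one table lookup."""
--     mask = 0
--     for ing in classified_ingredients:
--         mask |= _ingredient_mask(ing)
--     return _TABLE[mask]
-- ===== Notes on version B (the rewrite author's own statement) =====
-- stated objective: alternative
-- what changed: Instead of five boolean any() scans feeding a six-branch if/elif ladder, B maps each ingredient to a 5-bit feature mask, ORs the masks together in one pass, and returns the answer by indexing a precomputed 32-entry lookup table, eliminating the decision ladder entirely.
import Mathlib
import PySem

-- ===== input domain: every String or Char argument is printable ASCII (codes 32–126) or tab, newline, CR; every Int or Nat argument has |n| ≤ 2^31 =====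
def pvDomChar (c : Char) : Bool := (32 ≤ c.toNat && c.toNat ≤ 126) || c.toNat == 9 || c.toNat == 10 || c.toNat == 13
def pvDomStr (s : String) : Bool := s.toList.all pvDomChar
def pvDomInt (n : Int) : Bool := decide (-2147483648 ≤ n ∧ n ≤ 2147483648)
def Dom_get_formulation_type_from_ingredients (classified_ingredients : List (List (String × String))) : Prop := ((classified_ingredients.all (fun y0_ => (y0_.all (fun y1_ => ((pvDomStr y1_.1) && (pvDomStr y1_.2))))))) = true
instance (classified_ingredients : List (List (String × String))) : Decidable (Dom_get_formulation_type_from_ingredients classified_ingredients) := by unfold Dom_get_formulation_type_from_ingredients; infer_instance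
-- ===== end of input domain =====

-- B replaces A's five separate any() scans and six-branch ladder by a per-ingredient 5-bit
-- feature mask OR-ed over the list and a single lookup in a precomputed 32-entry table
-- (objective: alternative).


-- ===== PORT A =====
def get_formulation_type_from_ingredients (classified_ingredients : List (List (String × String))) : String :=
  let has_chocolate := classified_ingredients.any (fun ing =>
    PySem.Str.isIn "chocolate" (PySem.Str.lower ((PySem.Dict.mk ing).getD "name" ""))
    || PySem.Str.isIn "cocoa" (PySem.Str.lower ((PySem.Dict.mk ing).getD "name" "")))
  let has_nuts := classified_ingredients.any (fun ing =>
    (PySem.Dict.mk ing).get? "class_name" == some "B_NUT")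
  let has_eggs := classified_ingredients.any (fun ing =>
    PySem.Str.isIn "egg" (PySem.Str.lower ((PySem.Dict.mk ing).getD "name" "")))
  let has_dairy := classified_ingredients.any (fun ing =>
    (PySem.Dict.mk ing).get? "class_name" == some "A_DAIRY")
  let has_fruit := classified_ingredients.any (fun ing =>
    PySem.Str.isIn "fruit" (PySem.Str.lower ((PySem.Dict.mk ing).getD "name" ""))
    || ["mango", "strawberry", "orange", "lemon", "apple"].any (fun fruit =>
         PySem.Str.isIn fruit (PySem.Str.lower ((PySem.Dict.mk ing).getD "name" ""))))
  if has_chocolate then "cocoa_chocolate"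
  else if has_nuts || has_eggs then "eggs_nuts"
  else if has_fruit && has_dairy then "dairy_fruit"
  else if has_dairy && !has_fruit then "pure_dairy"
  else if has_fruit && !has_dairy then "fruit_sorbet"
  else "dairy_fruit"

-- ===== PORT B =====
def pvFruitWords : List String := ["fruit", "mango", "strawberry", "orange", "lemon", "apple"]

-- bit 0 = chocolate/cocoa, bit 1 = nuts, bit 2 = eggs, bit 3 = dairy, bit 4 = fruit
def pvTable : List String :=
  ["dairy_fruit", "cocoa_chocolate", "eggs_nuts", "cocoa_chocolate", "eggs_nuts", "cocoa_chocolate", "eggs_nuts", "cocoa_chocolate",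
   "pure_dairy", "cocoa_chocolate", "eggs_nuts", "cocoa_chocolate", "eggs_nuts", "cocoa_chocolate", "eggs_nuts", "cocoa_chocolate",
   "fruit_sorbet", "cocoa_chocolate", "eggs_nuts", "cocoa_chocolate", "eggs_nuts", "cocoa_chocolate", "eggs_nuts", "cocoa_chocolate",
   "dairy_fruit", "cocoa_chocolate", "eggs_nuts", "cocoa_chocolate", "eggs_nuts", "cocoa_chocolate", "eggs_nuts", "cocoa_chocolate"]

def pvIngredientMask (ing : List (String × String)) : Nat :=
  let name := PySem.Str.lower ((PySem.Dict.mk ing).getD "name" "")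
  let cls := (PySem.Dict.mk ing).get? "class_name"
  let mask : Nat := 0
  let mask := if PySem.Str.isIn "chocolate" name || PySem.Str.isIn "cocoa" name then mask ||| 1 else mask
  let mask := if cls == some "B_NUT" then mask ||| 2 else mask
  let mask := if PySem.Str.isIn "egg" name then mask ||| 4 else mask
  let mask := if cls == some "A_DAIRY" then mask ||| 8 else mask
  let mask := if pvFruitWords.any (fun w => PySem.Str.isIn w name) then mask ||| 16 else mask
  mask

def get_formulation_type_from_ingredients_alt (classified_ingredients : List (List (String × String))) : String :=
  let mask := classified_ingredients.foldl (fun m ing => m ||| pvIngredientMask ing) 0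
  -- _TABLE[mask]: the mask is always < 32, so Python's list indexing never raises
  pvTable.getD mask ""

-- ===== PRECONDITION & SPEC =====
def Spec_get_formulation_type_from_ingredients (classified_ingredients : List (List (String × String))) (out : String) : Prop := out = get_formulation_type_from_ingredients_alt classified_ingredients
instance (classified_ingredients : List (List (String × String))) (out : String) : Decidable (Spec_get_formulation_type_from_ingredients classified_ingredients out) := by unfold Spec_get_formulation_type_from_ingredients; infer_instance

-- ===== CLAIM (what is proved, stated in full; the proofs are below) =====
def Claim_equal_get_formulation_type_from_ingredients : Prop := ∀ (classified_ingredients : List (List (String × String))), Dom_get_formulation_type_from_ingredients classified_ingredients → Spec_get_formulation_type_from_ingredients classified_ingredients (get_formulation_type_from_ingredients classified_ingredients)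

-- ===== LEMMAS AND PROOFS =====

-- the abstract 5-flag encoding that pvIngredientMask instantiates
def pvEncode (c n e d f : Bool) : Nat :=
  (if c then 1 else 0) ||| (if n then 2 else 0) ||| (if e then 4 else 0)
    ||| (if d then 8 else 0) ||| (if f then 16 else 0)

theorem pvMaskChain_eq (c n e d f : Bool) :
    (let mask : Nat := 0
     let mask := if c then mask ||| 1 else mask
     let mask := if n then mask ||| 2 else mask
     let mask := if e then mask ||| 4 else mask
     let mask := if d then mask ||| 8 else mask
     let mask := if f then mask ||| 16 else mask
     mask) = pvEncode c n e d f := by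
  revert c n e d f; decide

theorem pvIngredientMask_eq_encode (ing : List (String × String)) :
    pvIngredientMask ing =
      pvEncode
        (PySem.Str.isIn "chocolate" (PySem.Str.lower ((PySem.Dict.mk ing).getD "name" ""))
          || PySem.Str.isIn "cocoa" (PySem.Str.lower ((PySem.Dict.mk ing).getD "name" "")))
        ((PySem.Dict.mk ing).get? "class_name" == some "B_NUT")
        (PySem.Str.isIn "egg" (PySem.Str.lower ((PySem.Dict.mk ing).getD "name" "")))
        ((PySem.Dict.mk ing).get? "class_name" == some "A_DAIRY")
        (pvFruitWords.any (fun w => PySem.Str.isIn w (PySem.Str.lower ((PySem.Dict.mk ing).getD "name" "")))) := by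
  unfold pvIngredientMask
  exact pvMaskChain_eq _ _ _ _ _

theorem pvEncode_or (c1 n1 e1 d1 f1 c2 n2 e2 d2 f2 : Bool) :
    pvEncode c1 n1 e1 d1 f1 ||| pvEncode c2 n2 e2 d2 f2
      = pvEncode (c1 || c2) (n1 || n2) (e1 || e2) (d1 || d2) (f1 || f2) := by
  revert c1 n1 e1 d1 f1 c2 n2 e2 d2 f2; decide

theorem pvFold_mask (xs : List (List (String × String))) (c n e d f : Bool) :
    xs.foldl (fun m ing => m ||| pvIngredientMask ing) (pvEncode c n e d f)
      = pvEncode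
          (c || xs.any (fun ing =>
            PySem.Str.isIn "chocolate" (PySem.Str.lower ((PySem.Dict.mk ing).getD "name" ""))
            || PySem.Str.isIn "cocoa" (PySem.Str.lower ((PySem.Dict.mk ing).getD "name" ""))))
          (n || xs.any (fun ing => (PySem.Dict.mk ing).get? "class_name" == some "B_NUT"))
          (e || xs.any (fun ing => PySem.Str.isIn "egg" (PySem.Str.lower ((PySem.Dict.mk ing).getD "name" ""))))
          (d || xs.any (fun ing => (PySem.Dict.mk ing).get? "class_name" == some "A_DAIRY"))
          (f || xs.any (fun ing => pvFruitWords.any (fun w =>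
            PySem.Str.isIn w (PySem.Str.lower ((PySem.Dict.mk ing).getD "name" ""))))) := by
  induction xs generalizing c n e d f with
  | nil => simp
  | cons x xs ih =>
    rw [List.foldl_cons, pvIngredientMask_eq_encode x, pvEncode_or, ih]
    simp [List.any_cons, Bool.or_assoc]

theorem pvTable_lookup (c n e d f : Bool) :
    pvTable.getD (pvEncode c n e d f) ""
      = (if c then "cocoa_chocolate"
         else if n || e then "eggs_nuts"
         else if f && d then "dairy_fruit"
         else if d && !f then "pure_dairy"
         else if f && !d then "fruit_sorbet"
         else "dairy_fruit") := by
  cases c <;> cases n <;> cases e <;> cases d <;> cases f <;> rfl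

-- A's fruit predicate ('fruit' in name or any of five fruit words) is B's 6-word scan
theorem pvFruit_pred (s : String) :
    (PySem.Str.isIn "fruit" s
      || ["mango", "strawberry", "orange", "lemon", "apple"].any (fun w => PySem.Str.isIn w s))
      = pvFruitWords.any (fun w => PySem.Str.isIn w s) := by
  simp [pvFruitWords, List.any_cons]

theorem get_formulation_type_from_ingredients_eq (xs : List (List (String × String))) :
    get_formulation_type_from_ingredients xs = get_formulation_type_from_ingredients_alt xs := by
  unfold get_formulation_type_from_ingredients get_formulation_type_from_ingredients_alt
  rw [show (0 : Nat) = pvEncode false false false false false from rfl, pvFold_mask, pvTable_lookup]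
  simp only [Bool.false_or, pvFruit_pred]

-- ===== VERDICT (by name: the statement is the Claim_ definition above) =====
theorem get_formulation_type_from_ingredients_spec : Claim_equal_get_formulation_type_from_ingredients := by
  intro xs _
  unfold Spec_get_formulation_type_from_ingredients
  exact get_formulation_type_from_ingredients_eq xs
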